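-- pv_equiv track=rewrite | github.com/desktopgame/AtCoder | abc255/e.py | makeB
-- ===== SOURCE A (Python) =====
-- from typing import List
--
-- def makeB(src: List[int]) -> List[int]:
--     ret: List[int] = []
--     for i in range(0, len(src) + 1):
--         if i == 0:
--             ret.append(0)
--         else:
--             ret.append(src[i - 1] - ret[i - 1])
--     return ret
-- ===== SOURCE B (Python) =====
-- from typing import List
--
-- def makeB(src: List[int]) -> List[int]:
--     # signed running accumulator: B[i] = (-1)^i * sum_{j=1..i} (-1)^j * src[j-1]
--     res: List[int] = [0]
--     acc = 0
--     sign = 1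
--     for x in src:
--         sign = -sign
--         acc += sign * x
--         res.append(sign * acc)
--     return res
-- ===== Notes on version B (the rewrite author's own statement) =====
-- stated objective: alternative
-- what changed: B replaces A's self-referential recurrence ret[i]=src[i-1]-ret[i-1] (which indexes back into the output list) by a signed running alternating-sum accumulator over the source, never reading the output back.
import Mathlib
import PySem

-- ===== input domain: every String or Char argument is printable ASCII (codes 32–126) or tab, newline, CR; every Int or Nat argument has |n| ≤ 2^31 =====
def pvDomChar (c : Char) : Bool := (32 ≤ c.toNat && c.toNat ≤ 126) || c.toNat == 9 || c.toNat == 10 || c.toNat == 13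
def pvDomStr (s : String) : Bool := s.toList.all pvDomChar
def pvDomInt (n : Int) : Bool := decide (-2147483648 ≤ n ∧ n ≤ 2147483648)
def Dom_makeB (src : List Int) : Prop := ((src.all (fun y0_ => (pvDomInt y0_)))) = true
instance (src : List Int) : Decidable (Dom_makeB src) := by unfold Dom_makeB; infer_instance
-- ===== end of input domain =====

-- B replaces A's self-referential recurrence ret[i] = src[i-1] - ret[i-1] by a signed running
-- alternating-sum accumulator over the source (objective: alternative decomposition, same cost).

-- ===== PORT A =====
-- literal port of A: loop i over range(0, len(src)+1), appending to ret, reading src[i-1] and ret[i-1]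
def makeB (src : List Int) : List Int :=
  (PySem.List.pyRange 0 ((src.length : Int) + 1) 1).foldl
    (fun ret i =>
      if i = 0 then ret ++ [0]
      else ret ++ [PySem.List.pyGetD src (i - 1) 0 - PySem.List.pyGetD ret (i - 1) 0])
    []

-- ===== PORT B =====
-- literal port of B: state (res, acc, sign); per element flip sign, add sign*x, append sign*acc
def makeB_alt (src : List Int) : List Int :=
  (src.foldl
    (fun (st : List Int × Int × Int) x =>
      let sign := -st.2.2
      let acc := st.2.1 + sign * x
      (st.1 ++ [sign * acc], acc, sign))
    ([0], 0, 1)).1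

-- ===== PRECONDITION & SPEC =====
def Spec_makeB (src : List Int) (out : List Int) : Prop := out = makeB_alt src
instance (src : List Int) (out : List Int) : Decidable (Spec_makeB src out) := by unfold Spec_makeB; infer_instance

-- ===== CLAIM (what is proved, stated in full; the proofs are below) =====
def Claim_equal_makeB : Prop := ∀ (src : List Int), Dom_makeB src → Spec_makeB src (makeB src)

-- ===== LEMMAS AND PROOFS =====

-- reference form: chain xs p = list of successive values x - prev
def pvChain : List Int → Int → List Int
  | [], _ => []
  | x :: xs, p => (x - p) :: pvChain xs (x - p)

-- the "previous value" after consuming xs starting from p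
def pvAfter (xs : List Int) (p : Int) : Int := xs.foldl (fun p x => x - p) p

theorem pvChain_append (xs : List Int) (x p : Int) :
    pvChain (xs ++ [x]) p = pvChain xs p ++ [x - pvAfter xs p] := by
  induction xs generalizing p with
  | nil => rfl
  | cons y ys ih => simp [pvChain, pvAfter, ih, List.foldl]

theorem pvChain_getD_last (xs : List Int) (p d : Int) :
    (p :: pvChain xs p).getD xs.length d = pvAfter xs p := by
  induction xs generalizing p with
  | nil => rfl
  | cons x xs ih => simpa [pvChain, pvAfter, List.foldl] using ih (x - p)

-- B-side invariant
theorem makeB_alt_inv (xs : List Int) (res : List Int) (acc sign : Int) (h : sign * sign = 1) :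
    (xs.foldl
      (fun (st : List Int × Int × Int) x =>
        let sign := -st.2.2
        let acc := st.2.1 + sign * x
        (st.1 ++ [sign * acc], acc, sign))
      (res, acc, sign)).1 = res ++ pvChain xs (sign * acc) := by
  induction xs generalizing res acc sign with
  | nil => simp [pvChain]
  | cons x xs ih =>
    have hs : (-sign) * (-sign) = 1 := by ring_nf; linarith [h]
    have key : (-sign) * (acc + (-sign) * x) = x - sign * acc := by
      have : sign * sign * x = x := by rw [h]; ring
      nlinarith [this]
    simp only [List.foldl]
    rw [ih (res ++ [(-sign) * (acc + (-sign) * x)]) (acc + (-sign) * x) (-sign) hs]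
    rw [key]
    simp [pvChain]

-- A-side invariant: the fold over range(0, n+1) builds 0 :: pvChain (take n src) 0
theorem makeB_inv (src : List Int) (n : Nat) (hn : n ≤ src.length) :
    (PySem.List.pyRange 0 ((n : Int) + 1) 1).foldl
      (fun ret i =>
        if i = 0 then ret ++ [0]
        else ret ++ [PySem.List.pyGetD src (i - 1) 0 - PySem.List.pyGetD ret (i - 1) 0])
      [] = 0 :: pvChain (src.take n) 0 := by
  induction n with
  | zero =>
    rw [show ((0 : Nat) : Int) + 1 = 0 + 1 by norm_num, PySem.List.pyRange_one_singleton]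
    simp [pvChain]
  | succ n ih =>
    have hn' : n ≤ src.length := Nat.le_of_succ_le hn
    have hsplit : PySem.List.pyRange 0 (((n + 1 : Nat) : Int) + 1) 1
        = PySem.List.pyRange 0 ((n : Int) + 1) 1 ++ [(n : Int) + 1] := by
      have := PySem.List.pyRange_one_succ_right (a := 0) (b := (n : Int) + 1) (by positivity)
      push_cast
      exact this
    rw [hsplit, List.foldl_append, ih hn']
    have hne : ¬ ((n : Int) + 1 = 0) := by omega
    simp only [List.foldl, hne, if_false]
    have hidx : (n : Int) + 1 - 1 = (n : Int) := by ring
    rw [hidx]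
    have hsrc : PySem.List.pyGetD src (n : Int) 0 = src[n]'(by omega) := by
      rw [PySem.List.pyGetD_natCast]
      exact List.getD_eq_getElem src 0 (by omega)
    have hlen : (src.take n).length = n := by simp [hn']
    have hret : PySem.List.pyGetD (0 :: pvChain (src.take n) 0) (n : Int) 0
        = pvAfter (src.take n) 0 := by
      rw [PySem.List.pyGetD_natCast]
      have := pvChain_getD_last (src.take n) 0 0
      rwa [hlen] at this
    rw [hsrc, hret]
    have htake : src.take (n + 1) = src.take n ++ [src[n]'(by omega)] := by
      rw [List.take_add_one]
      simp [List.getElem?_eq_getElem (by omega : n < src.length)]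
    rw [htake, pvChain_append]
    simp

-- ===== VERDICT (by name: the statement is the Claim_ definition above) =====
theorem makeB_spec : Claim_equal_makeB := by
  intro src _
  unfold Spec_makeB makeB makeB_alt
  rw [makeB_inv src src.length (le_refl _)]
  rw [makeB_alt_inv src [0] 0 1 (by ring)]
  simp
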